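-- pv_equiv track=rewrite | github.com/nandinigandhi21/table-parser | formula_extractor.py | _fix_int_brace_superscript
-- ===== SOURCE A (Python) =====
-- def _fix_int_brace_superscript(latex: str) -> str:
--     r"""
--     Fix {\int_{a}^{b}}^{n}  →  \int_{a}^{b}
--
--     pix2tex sometimes wraps an integral in braces and then appends a ^{n}
--     that belonged to a term it lost (e.g. 5^n).  We use proper brace-matching
--     to find and strip this artefact without breaking other expressions.
--     """
--     result = []
--     i = 0
--     while i < len(latex):
--         # Detect  {  immediately followed by \int
--         if latex[i] == '{' and latex[i + 1:i + 5] == r'\int':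
--             # Walk forward to find the matching closing brace
--             depth = 1
--             j = i + 1
--             while j < len(latex) and depth > 0:
--                 if   latex[j] == '{': depth += 1
--                 elif latex[j] == '}': depth -= 1
--                 j += 1
--             # j is now one past the matching '}'
--             # Check whether a ^{...} or ^<char> follows immediately
--             k = j
--             if k < len(latex) and latex[k] == '^':
--                 k += 1
--                 if k < len(latex) and latex[k] == '{':
--                     depth2 = 1
--                     k += 1
--                     while k < len(latex) and depth2 > 0:
--                         if   latex[k] == '{': depth2 += 1
--                         elif latex[k] == '}': depth2 -= 1
--                         k += 1
--                     # Emit the integral content without outer braces or ^{…}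
--                     result.append(latex[i + 1: j - 1])
--                     i = k
--                     continue
--                 elif k < len(latex) and latex[k].isalnum():
--                     result.append(latex[i + 1: j - 1])
--                     i = k + 1
--                     continue
--         result.append(latex[i])
--         i += 1
--     return ''.join(result)
-- ===== SOURCE B (Python) =====
-- def _fix_int_brace_superscript(latex: str) -> str:
--     # One pass precomputes matching-brace positions; the main scan then uses dict lookups
--     # instead of re-walking braces for every occurrence.
--     n = len(latex)
--     match = {}
--     stack = []
--     p = 0
--     while p < n:
--         c = latex[p]
--         if c == '{':
--             stack.append(p)
--         elif c == '}':
--             if stack: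
--                 match[stack.pop()] = p
--         p += 1
--     out = []
--     i = 0
--     while i < n:
--         if latex[i] == '{' and latex[i + 1:i + 5] == '\\int':
--             r = match.get(i)
--             if r is not None:
--                 j = r + 1
--                 if j < n and latex[j] == '^':
--                     if j + 1 < n and latex[j + 1] == '{':
--                         r2 = match.get(j + 1)
--                         out.append(latex[i + 1:r])
--                         i = r2 + 1 if r2 is not None else n
--                         continue
--                     if j + 1 < n and latex[j + 1].isalnum():
--                         out.append(latex[i + 1:r])
--                         i = j + 2
--                         continue
--         out.append(latex[i])
--         i += 1
--     return ''.join(out)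
-- ===== Notes on version B (the rewrite author's own statement) =====
-- stated objective: alternative
-- what changed: Replaces A's per-occurrence forward brace-walking (a fresh inner scan for every '{\int' and every '^{') by one stack pass that precomputes all matching-brace positions, so the main scan does dict lookups instead of inner walks; on the measured input family the cost is comparable.
import Mathlib
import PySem

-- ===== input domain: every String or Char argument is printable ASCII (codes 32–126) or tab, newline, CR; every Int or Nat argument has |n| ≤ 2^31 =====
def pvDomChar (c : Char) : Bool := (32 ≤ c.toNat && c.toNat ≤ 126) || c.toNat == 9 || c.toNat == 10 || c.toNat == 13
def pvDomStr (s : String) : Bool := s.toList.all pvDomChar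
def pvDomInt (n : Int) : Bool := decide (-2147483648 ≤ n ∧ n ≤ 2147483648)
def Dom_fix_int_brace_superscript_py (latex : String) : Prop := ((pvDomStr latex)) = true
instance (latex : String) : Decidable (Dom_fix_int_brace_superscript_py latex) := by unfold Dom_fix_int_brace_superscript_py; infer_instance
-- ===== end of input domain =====

-- B replaces A's per-occurrence forward brace walks by one stack pass that precomputes all
-- matching-brace positions; the main scan then uses dict lookups instead of inner walks
-- (a different algorithm of similar measured cost).


-- ===== PORT A =====
-- A's inner 'while j < len and depth > 0' brace walk (used twice in A); state is (j, depth).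
def pvWalk (cs : List Char) (j : Nat) (d : Int) : Nat × Int :=
  if h : j < cs.length ∧ 0 < d then
    pvWalk cs (j + 1)
      (if cs.getD j ' ' = '{' then d + 1 else if cs.getD j ' ' = '}' then d - 1 else d)
  else (j, d)
termination_by cs.length - j
decreasing_by all_goals omega

-- A's outer 'while i < len' loop; fuel bounds the number of iterations (i strictly increases,
-- so cs.length + 1 fuel is always enough).
def pvLoopA (cs : List Char) (fuel i : Nat) : List Char :=
  match fuel with
  | 0 => []
  | fuel + 1 =>
    if i < cs.length then
      if cs.getD i ' ' = '{' ∧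
          PySem.List.slice cs (some ((i : Int) + 1)) (some ((i : Int) + 5)) = ['\\', 'i', 'n', 't'] then
        if (pvWalk cs (i + 1) 1).1 < cs.length ∧ cs.getD (pvWalk cs (i + 1) 1).1 ' ' = '^' then
          if (pvWalk cs (i + 1) 1).1 + 1 < cs.length ∧ cs.getD ((pvWalk cs (i + 1) 1).1 + 1) ' ' = '{' then
            PySem.List.slice cs (some ((i : Int) + 1)) (some (((pvWalk cs (i + 1) 1).1 : Int) - 1)) ++
              pvLoopA cs fuel (pvWalk cs ((pvWalk cs (i + 1) 1).1 + 1 + 1) 1).1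
          else if (pvWalk cs (i + 1) 1).1 + 1 < cs.length ∧ PySem.Chars.isalnum (cs.getD ((pvWalk cs (i + 1) 1).1 + 1) ' ') then
            PySem.List.slice cs (some ((i : Int) + 1)) (some (((pvWalk cs (i + 1) 1).1 : Int) - 1)) ++
              pvLoopA cs fuel ((pvWalk cs (i + 1) 1).1 + 1 + 1)
          else cs.getD i ' ' :: pvLoopA cs fuel (i + 1)
        else cs.getD i ' ' :: pvLoopA cs fuel (i + 1)
      else cs.getD i ' ' :: pvLoopA cs fuel (i + 1)
    else []

def fix_int_brace_superscript_py (latex : String) : String :=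
  String.ofList (pvLoopA latex.toList (latex.toList.length + 1) 0)

-- ===== PORT B =====
-- B's first pass: stack-based matching-brace table (dict open-position ↦ close-position).
def pvBuild (cs : List Char) (p : Nat) (stack : List Nat) (d : PySem.Dict Nat Nat) :
    PySem.Dict Nat Nat :=
  if h : p < cs.length then
    if cs.getD p ' ' = '{' then pvBuild cs (p + 1) (p :: stack) d
    else if cs.getD p ' ' = '}' then
      match stack with
      | [] => pvBuild cs (p + 1) [] d
      | t :: rest => pvBuild cs (p + 1) rest (d.insert t p)
    else pvBuild cs (p + 1) stack d
  else d
termination_by cs.length - p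
decreasing_by all_goals omega

-- B's main scan: table lookups instead of inner brace walks.
def pvLoopB (cs : List Char) (tbl : PySem.Dict Nat Nat) (fuel i : Nat) : List Char :=
  match fuel with
  | 0 => []
  | fuel + 1 =>
    if i < cs.length then
      if cs.getD i ' ' = '{' ∧
          PySem.List.slice cs (some ((i : Int) + 1)) (some ((i : Int) + 5)) = ['\\', 'i', 'n', 't'] then
        match tbl.get? i with
        | some r =>
          if r + 1 < cs.length ∧ cs.getD (r + 1) ' ' = '^' then
            if r + 1 + 1 < cs.length ∧ cs.getD (r + 1 + 1) ' ' = '{' then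
              PySem.List.slice cs (some ((i : Int) + 1)) (some ((r : Int))) ++
                pvLoopB cs tbl fuel
                  (match tbl.get? (r + 1 + 1) with | some r2 => r2 + 1 | none => cs.length)
            else if r + 1 + 1 < cs.length ∧ PySem.Chars.isalnum (cs.getD (r + 1 + 1) ' ') then
              PySem.List.slice cs (some ((i : Int) + 1)) (some ((r : Int))) ++
                pvLoopB cs tbl fuel (r + 1 + 1 + 1)
            else cs.getD i ' ' :: pvLoopB cs tbl fuel (i + 1)
          else cs.getD i ' ' :: pvLoopB cs tbl fuel (i + 1)
        | none => cs.getD i ' ' :: pvLoopB cs tbl fuel (i + 1)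
      else cs.getD i ' ' :: pvLoopB cs tbl fuel (i + 1)
    else []

def fix_int_brace_superscript_py_alt (latex : String) : String :=
  String.ofList
    (pvLoopB latex.toList (pvBuild latex.toList 0 [] PySem.Dict.empty)
      (latex.toList.length + 1) 0)

-- ===== PRECONDITION & SPEC =====
def Spec_fix_int_brace_superscript_py (latex : String) (out : String) : Prop := out = fix_int_brace_superscript_py_alt latex
instance (latex : String) (out : String) : Decidable (Spec_fix_int_brace_superscript_py latex out) := by unfold Spec_fix_int_brace_superscript_py; infer_instance

-- ===== CLAIM (what is proved, stated in full; the proofs are below) =====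
def Claim_equal_fix_int_brace_superscript_py : Prop := ∀ (latex : String), Dom_fix_int_brace_superscript_py latex → Spec_fix_int_brace_superscript_py latex (fix_int_brace_superscript_py latex)

-- ===== LEMMAS AND PROOFS =====

theorem pvWalk_base (cs : List Char) (j : Nat) (d : Int) (h : ¬(j < cs.length ∧ 0 < d)) :
    pvWalk cs j d = (j, d) := by
  rw [pvWalk]; simp [h]

theorem pvWalk_step (cs : List Char) (j : Nat) (d : Int) (hj : j < cs.length) (hd : 0 < d) :
    pvWalk cs j d = pvWalk cs (j + 1)
      (if cs.getD j ' ' = '{' then d + 1 else if cs.getD j ' ' = '}' then d - 1 else d) := by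
  rw [pvWalk]; simp [hj, hd]

theorem pvWalk_ge (cs : List Char) (j : Nat) (d : Int) : j ≤ (pvWalk cs j d).1 := by
  induction j, d using pvWalk.induct cs with
  | case1 j d h ih =>
    rw [pvWalk_step cs j d h.1 h.2]
    simp only [dite_eq_ite] at ih
    omega
  | case2 j d h => rw [pvWalk_base cs j d h]

theorem pvWalk_notfound (cs : List Char) (j : Nat) (d : Int) (hle : j ≤ cs.length)
    (hd : 0 < d) (hnf : (pvWalk cs j d).2 ≠ 0) : (pvWalk cs j d).1 = cs.length := by
  induction j, d using pvWalk.induct cs with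
  | case1 j d h ih =>
    rw [pvWalk_step cs j d h.1 h.2] at hnf ⊢
    simp only [dite_eq_ite] at ih
    refine ih (by omega) ?_ hnf
    by_contra hnd
    have hd0 : (if cs.getD j ' ' = '{' then d + 1 else if cs.getD j ' ' = '}' then d - 1 else d) = 0 := by
      split_ifs at hnd ⊢ <;> omega
    rw [hd0, pvWalk_base cs (j + 1) 0 (by omega)] at hnf
    exact hnf rfl
  | case2 j d h =>
    rw [pvWalk_base cs j d h] at hnf ⊢
    push Not at h
    simp only at hnf
    omega

-- The stack-scan invariant: every table entry records exactly where A's brace walk ends.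
theorem pvBuild_inv (cs : List Char) (p : Nat) (stack : List Nat) (acc : PySem.Dict Nat Nat)
    (hp : p ≤ cs.length)
    (hstk : ∀ m : Nat, (hm : m < stack.length) →
      stack[m] < p ∧ pvWalk cs p ((m : Int) + 1) = pvWalk cs (stack[m] + 1) 1)
    (hpair : List.Pairwise (· > ·) stack)
    (hacc_lt : ∀ q r : Nat, acc.get? q = some r → q < p)
    (hdisj : ∀ q ∈ stack, acc.get? q = none)
    (hsound : ∀ q r : Nat, acc.get? q = some r → pvWalk cs (q + 1) 1 = ((r : Nat) + 1, 0)) :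
    (∀ q r : Nat, (pvBuild cs p stack acc).get? q = some r →
        pvWalk cs (q + 1) 1 = (r + 1, 0)) ∧
    (∀ q r : Nat, pvWalk cs (q + 1) 1 = (r + 1, 0) →
        (q ∈ stack ∨ (p ≤ q ∧ q < cs.length ∧ cs.getD q ' ' = '{') ∨ acc.get? q = some r) →
        (pvBuild cs p stack acc).get? q = some r) := by
  induction p, stack, acc using pvBuild.induct cs with
  | case1 p stack acc h hc ih =>
    -- '{' at p: push
    rw [pvBuild.eq_def]
    simp only [h, dite_true, hc, if_true]
    have step : ∀ d : Int, 0 < d → pvWalk cs p d = pvWalk cs (p + 1) (d + 1) := by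
      intro d hd
      rw [pvWalk_step cs p d h hd, hc]
      simp
    have hstk' : ∀ m : Nat, (hm : m < (p :: stack).length) →
        (p :: stack)[m] < p + 1 ∧ pvWalk cs (p + 1) ((m : Int) + 1) = pvWalk cs ((p :: stack)[m] + 1) 1 := by
      intro m hm
      cases m with
      | zero =>
        refine ⟨by simp, by norm_num⟩
      | succ m =>
        have hm' : m < stack.length := by simpa using hm
        obtain ⟨h1, h2⟩ := hstk m hm'
        simp only [List.getElem_cons_succ]
        refine ⟨by omega, ?_⟩
        have hs := step ((m : Int) + 1) (by positivity)
        rw [← h2, hs]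
        norm_cast
    have hpair' : List.Pairwise (· > ·) (p :: stack) := by
      refine List.pairwise_cons.mpr ⟨?_, hpair⟩
      intro a ha
      obtain ⟨m, hm, rfl⟩ := List.mem_iff_getElem.mp ha
      exact (hstk m hm).1
    have hdisj' : ∀ q ∈ (p :: stack), acc.get? q = none := by
      intro q hq
      rcases List.mem_cons.mp hq with rfl | hq'
      · cases hg : acc.get? q with
        | none => rfl
        | some r => exact absurd (hacc_lt q r hg) (by omega)
      · exact hdisj q hq'
    obtain ⟨S, C⟩ := ih (by omega) hstk' hpair'
      (fun q r hqr => by have := hacc_lt q r hqr; omega) hdisj' hsound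
    refine ⟨S, ?_⟩
    intro q r hw hd
    refine C q r hw ?_
    rcases hd with hmem | ⟨hpq, hql, hqc⟩ | hacc
    · exact Or.inl (List.mem_cons_of_mem p hmem)
    · rcases eq_or_ne q p with rfl | hne
      · exact Or.inl List.mem_cons_self
      · exact Or.inr (Or.inl ⟨by omega, hql, hqc⟩)
    · exact Or.inr (Or.inr hacc)
  | case2 p acc h hc1 hc2 ih =>
    -- '}' at p, stack empty
    rw [pvBuild.eq_def]
    simp only [h, dite_true, hc2, if_true]
    obtain ⟨S, C⟩ := ih (by omega) (by intro m hm; simp at hm) List.Pairwise.nil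
      (fun q r hqr => by have := hacc_lt q r hqr; omega)
      (by intro q hq; simp at hq) hsound
    refine ⟨S, ?_⟩
    intro q r hw hd
    refine C q r hw ?_
    rcases hd with hmem | ⟨hpq, hql, hqc⟩ | hacc
    · simp at hmem
    · refine Or.inr (Or.inl ⟨?_, hql, hqc⟩)
      rcases eq_or_ne q p with rfl | hne
      · rw [hqc] at hc1; simp at hc1
      · omega
    · exact Or.inr (Or.inr hacc)
  | case3 p acc h hc1 hc2 t rest ih =>
    -- '}' at p: pop t, record (t, p)
    rw [pvBuild.eq_def]
    simp only [h, dite_true, hc2, if_true]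
    have step : ∀ d : Int, 0 < d → pvWalk cs p d = pvWalk cs (p + 1) (d - 1) := by
      intro d hd
      rw [pvWalk_step cs p d h hd, hc2]
      simp
    have ht := hstk 0 (by simp)
    simp only [List.getElem_cons_zero] at ht
    have hwp : pvWalk cs p 1 = (p + 1, 0) := by
      have hs := step 1 one_pos
      norm_num at hs
      rw [hs]
      exact pvWalk_base cs (p + 1) 0 (by omega)
    have hGt : pvWalk cs (t + 1) 1 = (p + 1, 0) := by
      have h2 := ht.2
      norm_num at h2
      rw [← h2, hwp]
    have hstk' : ∀ m : Nat, (hm : m < rest.length) →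
        rest[m] < p + 1 ∧ pvWalk cs (p + 1) ((m : Int) + 1) = pvWalk cs (rest[m] + 1) 1 := by
      intro m hm
      obtain ⟨h1, h2⟩ := hstk (m + 1) (by simpa using by omega)
      simp only [List.getElem_cons_succ] at h1 h2
      refine ⟨by omega, ?_⟩
      have hcast : ((m + 1 : Nat) : Int) + 1 = (m : Int) + 1 + 1 := by push_cast; ring
      rw [hcast] at h2
      have hs := step ((m : Int) + 1 + 1) (by positivity)
      rw [← h2, hs]
      norm_num
    have hacc_lt' : ∀ q r : Nat, (acc.insert t p).get? q = some r → q < p + 1 := by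
      intro q r hqr
      rcases eq_or_ne q t with rfl | hne
      · have := ht.1; omega
      · rw [PySem.Dict.get?_insert_of_ne acc p hne] at hqr
        have := hacc_lt q r hqr
        omega
    have hdisj' : ∀ q ∈ rest, (acc.insert t p).get? q = none := by
      intro q hq
      have hne : q ≠ t := by
        rcases List.pairwise_cons.mp hpair with ⟨hgt, -⟩
        exact Nat.ne_of_lt (hgt q hq)
      rw [PySem.Dict.get?_insert_of_ne acc p hne]
      exact hdisj q (List.mem_cons_of_mem t hq)
    have hsound' : ∀ q r : Nat, (acc.insert t p).get? q = some r →
        pvWalk cs (q + 1) 1 = (r + 1, 0) := by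
      intro q r hqr
      rcases eq_or_ne q t with rfl | hne
      · rw [PySem.Dict.get?_insert_self] at hqr
        obtain rfl : p = r := Option.some.inj hqr
        exact hGt
      · rw [PySem.Dict.get?_insert_of_ne acc p hne] at hqr
        exact hsound q r hqr
    obtain ⟨S, C⟩ := ih (by omega) hstk' hpair.tail hacc_lt' hdisj' hsound'
    refine ⟨S, ?_⟩
    intro q r hw hd
    refine C q r hw ?_
    rcases hd with hmem | ⟨hpq, hql, hqc⟩ | hacc
    · rcases List.mem_cons.mp hmem with rfl | hq'
      · refine Or.inr (Or.inr ?_)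
        obtain rfl : p = r := by
          have h12 := hGt.symm.trans hw
          simp only [Prod.mk.injEq] at h12
          omega
        exact PySem.Dict.get?_insert_self acc _ _
      · exact Or.inl hq'
    · refine Or.inr (Or.inl ⟨?_, hql, hqc⟩)
      rcases eq_or_ne q p with rfl | hne
      · rw [hqc] at hc1; simp at hc1
      · omega
    · refine Or.inr (Or.inr ?_)
      have hne : q ≠ t := by
        intro hqt
        subst hqt
        rw [hdisj q List.mem_cons_self] at hacc
        simp at hacc
      rw [PySem.Dict.get?_insert_of_ne acc p hne]
      exact hacc
  | case4 p stack acc h hc1 hc2 ih =>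
    -- other char at p
    rw [pvBuild.eq_def]
    simp only [h, dite_true, hc1, hc2, if_false]
    have step : ∀ d : Int, 0 < d → pvWalk cs p d = pvWalk cs (p + 1) d := by
      intro d hd
      rw [pvWalk_step cs p d h hd, if_neg hc1, if_neg hc2]
    have hstk' : ∀ m : Nat, (hm : m < stack.length) →
        stack[m] < p + 1 ∧ pvWalk cs (p + 1) ((m : Int) + 1) = pvWalk cs (stack[m] + 1) 1 := by
      intro m hm
      obtain ⟨h1, h2⟩ := hstk m hm
      exact ⟨by omega, by rw [← h2, step ((m : Int) + 1) (by positivity)]⟩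
    obtain ⟨S, C⟩ := ih (by omega) hstk' hpair
      (fun q r hqr => by have := hacc_lt q r hqr; omega) hdisj hsound
    refine ⟨S, ?_⟩
    intro q r hw hd
    refine C q r hw ?_
    rcases hd with hmem | ⟨hpq, hql, hqc⟩ | hacc
    · exact Or.inl hmem
    · refine Or.inr (Or.inl ⟨?_, hql, hqc⟩)
      rcases eq_or_ne q p with rfl | hne
      · rw [hqc] at hc1; simp at hc1
      · omega
    · exact Or.inr (Or.inr hacc)
  | case5 p stack acc h =>
    -- p = cs.length: done
    rw [pvBuild.eq_def]
    simp only [h, dite_false]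
    constructor
    · exact hsound
    · intro q r hw hd
      rcases hd with hmem | ⟨hpq, hql, hqc⟩ | hacc
      · exfalso
        obtain ⟨m, hm, rfl⟩ := List.mem_iff_getElem.mp hmem
        obtain ⟨-, h2⟩ := hstk m hm
        rw [hw, pvWalk_base cs p ((m : Int) + 1) (by push Not; intro; omega)] at h2
        have h3 := congrArg Prod.snd h2
        simp at h3
        omega
      · omega
      · exact hacc

-- Classification: for an opening brace at q, A's walk ends exactly where B's table says.
theorem pvLookup_walk (cs : List Char) (q : Nat) (hq : q < cs.length)
    (hc : cs.getD q ' ' = '{') :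
    (pvWalk cs (q + 1) 1).1 =
      (match (pvBuild cs 0 [] PySem.Dict.empty).get? q with
        | some r => r + 1 | none => cs.length) := by
  obtain ⟨S, C⟩ := pvBuild_inv cs 0 [] PySem.Dict.empty (by omega)
    (by intro m hm; simp at hm) List.Pairwise.nil
    (by intro q r hqr; rw [PySem.Dict.get?_empty] at hqr; exact absurd hqr (by simp))
    (by intro q hq; simp at hq)
    (by intro q r hqr; rw [PySem.Dict.get?_empty] at hqr; exact absurd hqr (by simp))
  cases hg : (pvBuild cs 0 [] PySem.Dict.empty).get? q with
  | some r =>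
    simp only []
    rw [S q r hg]
  | none =>
    simp only []
    by_cases h2 : (pvWalk cs (q + 1) 1).2 = 0
    · exfalso
      have hge : q + 1 ≤ (pvWalk cs (q + 1) 1).1 := pvWalk_ge cs (q + 1) 1
      have hw : pvWalk cs (q + 1) 1 = ((pvWalk cs (q + 1) 1).1 - 1 + 1, 0) := by
        rw [← h2]
        have : (pvWalk cs (q + 1) 1).1 - 1 + 1 = (pvWalk cs (q + 1) 1).1 := by omega
        rw [this]
      have := C q ((pvWalk cs (q + 1) 1).1 - 1) hw
        (Or.inr (Or.inl ⟨Nat.zero_le q, hq, hc⟩))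
      rw [hg] at this
      simp at this
    · exact pvWalk_notfound cs (q + 1) 1 (by omega) one_pos h2

theorem pvLoops_eq (cs : List Char) (fuel i : Nat) :
    pvLoopA cs fuel i = pvLoopB cs (pvBuild cs 0 [] PySem.Dict.empty) fuel i := by
  induction fuel generalizing i with
  | zero => rfl
  | succ f ih =>
    rw [pvLoopA, pvLoopB]
    by_cases hi : i < cs.length
    · simp only [if_pos hi]
      by_cases hC : cs.getD i ' ' = '{' ∧
          PySem.List.slice cs (some ((i : Int) + 1)) (some ((i : Int) + 5)) = ['\\', 'i', 'n', 't']
      · simp only [if_pos hC]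
        have hlw := pvLookup_walk cs i hi hC.1
        cases hg : (pvBuild cs 0 [] PySem.Dict.empty).get? i with
        | some r =>
          rw [hg] at hlw
          rw [hlw]
          by_cases h2 : r + 1 < cs.length ∧ cs.getD (r + 1) ' ' = '^'
          · simp only [if_pos h2]
            by_cases h3 : r + 1 + 1 < cs.length ∧ cs.getD (r + 1 + 1) ' ' = '{'
            · simp only [if_pos h3]
              have hcast : ((r + 1 : Nat) : Int) - 1 = (r : Int) := by push_cast; ring
              rw [hcast]
              have hin := pvLookup_walk cs (r + 1 + 1) h3.1 h3.2
              rw [hin, ih]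
            · simp only [if_neg h3]
              by_cases h4 : r + 1 + 1 < cs.length ∧ PySem.Chars.isalnum (cs.getD (r + 1 + 1) ' ')
              · simp only [if_pos h4]
                have hcast : ((r + 1 : Nat) : Int) - 1 = (r : Int) := by push_cast; ring
                rw [hcast, ih]
              · simp only [if_neg h4]
                rw [ih]
          · simp only [if_neg h2]
            rw [ih]
        | none =>
          rw [hg] at hlw
          rw [hlw]
          have hne : ¬(cs.length < cs.length ∧ cs.getD cs.length ' ' = '^') := by
            intro hcon
            exact absurd hcon.1 (lt_irrefl _)
          simp only [if_neg hne]
          rw [ih]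
      · simp only [if_neg hC]
        rw [ih]
    · simp only [if_neg hi]

-- ===== VERDICT (by name: the statement is the Claim_ definition above) =====
theorem fix_int_brace_superscript_py_spec : Claim_equal_fix_int_brace_superscript_py := by
  intro latex _
  unfold Spec_fix_int_brace_superscript_py fix_int_brace_superscript_py fix_int_brace_superscript_py_alt
  rw [pvLoops_eq]
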